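-- pv_equiv track=rewrite | github.com/alcatrazEscapee/chromatic | scripts/overlay.py | scan_possible_values
-- ===== SOURCE A (Python) =====
-- def F(x: int, a: int, Wc: int, Wb: int) -> bool:
--     return ((x + a) % (Wc + Wb)) >= Wc
--
-- def scan_possible_values(N: int):
--     values = dict()  # (Wc, Wb) -> min a
--     for Wc in range(1, N):
--         for Wb in range(1, N):
--             W = Wc + Wb
--             if W < N and N % W == 0:  # Tiling condition
--                 for a in range(W):
--                     if all(  # Rotation condition
--                         F(x, a, Wc, Wb) == F(-x, a, Wc, Wb)
--                         for x in range(N)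
--                     ):
--                         key = Wc, Wb
--                         if key not in values:
--                             values[key] = a
--                         else:
--                             values[key] = min(values[key], a)
--
--     values = [(Wc, Wb, a) for (Wc, Wb), a in values.items()]
--     values.sort(key=lambda k: (abs(k[0] - k[1]), k))
--     return values
-- ===== SOURCE B (Python) =====
-- def scan_possible_values(N: int):
--     # The rotation condition holds iff 2*a == Wc - 1 (mod W), so the minimal a has a
--     # closed form; and only divisors W of N (W < N) can tile, so enumerate those once
--     # instead of scanning all (Wc, Wb) pairs and all a, x.
--     divisors = [W for W in range(2, N) if N % W == 0]
--     out = []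
--     for Wc in range(1, N):
--         for W in divisors:
--             if Wc < W:
--                 c = Wc - 1
--                 if W % 2 == 1:
--                     out.append((Wc, W - Wc, (c * ((W + 1) // 2)) % W))
--                 elif c % 2 == 0:
--                     out.append((Wc, W - Wc, c // 2))
--     out.sort(key=lambda k: (abs(k[0] - k[1]), k))
--     return out
-- ===== Notes on version B (the rewrite author's own statement) =====
-- stated objective: faster
-- what changed: A's quadruple loop (all (Wc,Wb) pairs, all candidate a in range(W), verifying the rotation condition over all x in range(N)) is replaced by enumerating only the divisors W of N once and computing the minimal a in closed form as the least solution of the congruence twice-a = Wc-1 (mod W).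
import Mathlib
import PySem

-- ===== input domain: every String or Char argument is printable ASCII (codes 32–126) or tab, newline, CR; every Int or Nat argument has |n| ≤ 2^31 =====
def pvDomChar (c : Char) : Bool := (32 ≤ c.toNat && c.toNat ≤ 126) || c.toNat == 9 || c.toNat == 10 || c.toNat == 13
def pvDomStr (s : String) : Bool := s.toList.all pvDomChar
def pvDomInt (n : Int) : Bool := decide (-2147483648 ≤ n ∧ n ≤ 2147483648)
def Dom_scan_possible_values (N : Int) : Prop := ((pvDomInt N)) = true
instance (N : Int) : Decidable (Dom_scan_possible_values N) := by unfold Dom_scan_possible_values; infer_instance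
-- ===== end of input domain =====

-- B replaces A's inner two loops (min a in range(W) checked against all x in range(N)) by the
-- closed-form least solution of the congruence 2*a ≡ Wc - 1 (mod W); objective: faster.

-- ===== PORT A =====
def pyF (x a Wc Wb : Int) : Bool := decide (Wc ≤ PySem.Int.mod (x + a) (Wc + Wb))

-- the body of A's loop over a (insert / min-update of the dict)
def aStep (N Wc Wb : Int) (values : PySem.Dict (Int × Int) Int) (a : Int) : PySem.Dict (Int × Int) Int :=
  if (PySem.List.pyRange 0 N 1).all (fun x => pyF x a Wc Wb == pyF (-x) a Wc Wb) then
    if values.contains (Wc, Wb) = false then values.insert (Wc, Wb) a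
    else values.insert (Wc, Wb) (min ((values.get? (Wc, Wb)).getD 0) a)
  else values

def scan_possible_values (N : Int) : List (List Int) :=
  let values : PySem.Dict (Int × Int) Int :=
    (PySem.List.pyRange 1 N 1).foldl (fun values Wc =>
      (PySem.List.pyRange 1 N 1).foldl (fun values Wb =>
        if Wc + Wb < N ∧ PySem.Int.mod N (Wc + Wb) = 0 then
          (PySem.List.pyRange 0 (Wc + Wb) 1).foldl (aStep N Wc Wb) values
        else values) values) PySem.Dict.empty
  PySem.List.sorted2 (values.items.map (fun p => [p.1.1, p.1.2, p.2]))
    (fun k => |PySem.List.pyGetD k 0 0 - PySem.List.pyGetD k 1 0|) (fun k => k) false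

-- ===== PORT B =====
def scan_possible_values_alt (N : Int) : List (List Int) :=
  let divisors : List Int := (PySem.List.pyRange 2 N 1).filter (fun W => decide (PySem.Int.mod N W = 0))
  let out : List (List Int) :=
    (PySem.List.pyRange 1 N 1).foldl (fun out Wc =>
      divisors.foldl (fun out W =>
        if Wc < W then
          if PySem.Int.mod W 2 = 1 then
            out ++ [[Wc, W - Wc, PySem.Int.mod ((Wc - 1) * PySem.Int.floordiv (W + 1) 2) W]]
          else if PySem.Int.mod (Wc - 1) 2 = 0 then
            out ++ [[Wc, W - Wc, PySem.Int.floordiv (Wc - 1) 2]]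
          else out
        else out) out) []
  PySem.List.sorted2 out
    (fun k => |PySem.List.pyGetD k 0 0 - PySem.List.pyGetD k 1 0|) (fun k => k) false

-- ===== PRECONDITION & SPEC =====
def Spec_scan_possible_values (N : Int) (out : List (List Int)) : Prop := out = scan_possible_values_alt N
instance (N : Int) (out : List (List Int)) : Decidable (Spec_scan_possible_values N out) := by unfold Spec_scan_possible_values; infer_instance

-- ===== CLAIM (what is proved, stated in full; the proofs are below) =====
def Claim_equal_scan_possible_values : Prop := ∀ (N : Int), Dom_scan_possible_values N → Spec_scan_possible_values N (scan_possible_values N)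

-- ===== LEMMAS AND PROOFS =====

-- B's closed-form minimal solution, as an Option (proof-side view of B's branches)
def solA (Wc Wb : Int) : Option Int :=
  if PySem.Int.mod (Wc + Wb) 2 = 1 then
    some (PySem.Int.mod ((Wc - 1) * PySem.Int.floordiv (Wc + Wb + 1) 2) (Wc + Wb))
  else if PySem.Int.mod (Wc - 1) 2 = 0 then some (PySem.Int.floordiv (Wc - 1) 2)
  else none

-- one (Wc, Wb) entry of the final dict, as an Option
def gEnt (N Wc Wb : Int) : Option ((Int × Int) × Int) :=
  if Wc + Wb < N ∧ PySem.Int.mod N (Wc + Wb) = 0 then (solA Wc Wb).map (fun a => ((Wc, Wb), a))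
  else none

-- A's rotation condition
def condA (N Wc Wb a : Int) : Bool :=
  (PySem.List.pyRange 0 N 1).all (fun x => pyF x a Wc Wb == pyF (-x) a Wc Wb)

-- the rotation condition is exactly the congruence 2*a ≡ Wc - 1 (mod W)
theorem condA_iff (N Wc Wb a : Int) (h1 : 1 ≤ Wc) (h2 : 1 ≤ Wb) (hlt : Wc + Wb < N) :
    condA N Wc Wb a = true ↔ (2 * a) % (Wc + Wb) = Wc - 1 := by
  have hW : (0:Int) < Wc + Wb := by omega
  rw [condA, List.all_eq_true]
  have hsimp : ∀ x : Int, (pyF x a Wc Wb == pyF (-x) a Wc Wb) = true ↔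
      (Wc ≤ (x + a) % (Wc + Wb) ↔ Wc ≤ (a - x) % (Wc + Wb)) := by
    intro x
    rw [beq_iff_eq, pyF, pyF, decide_eq_decide,
      PySem.Int.mod_eq_emod_of_pos hW, PySem.Int.mod_eq_emod_of_pos hW]
    constructor
    · intro h; rw [show -x + a = a - x by ring] at h; exact h
    · intro h; rw [show -x + a = a - x by ring]; exact h
  constructor
  · intro h
    have hx0m : (Wc - 1 - a) % (Wc + Wb) ∈ PySem.List.pyRange 0 N 1 := by
      rw [PySem.List.mem_pyRange_one]
      have := Int.emod_nonneg (Wc - 1 - a) (by omega : (Wc + Wb) ≠ 0)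
      have := Int.emod_lt_of_pos (Wc - 1 - a) hW
      omega
    have hx1m : (Wc - a) % (Wc + Wb) ∈ PySem.List.pyRange 0 N 1 := by
      rw [PySem.List.mem_pyRange_one]
      have := Int.emod_nonneg (Wc - a) (by omega : (Wc + Wb) ≠ 0)
      have := Int.emod_lt_of_pos (Wc - a) hW
      omega
    have h0 := (hsimp _).mp (h _ hx0m)
    have h1' := (hsimp _).mp (h _ hx1m)
    have e0 : ((Wc - 1 - a) % (Wc + Wb) + a) % (Wc + Wb) = Wc - 1 := by
      rw [Int.emod_add_emod, show Wc - 1 - a + a = Wc - 1 by ring]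
      exact Int.emod_eq_of_lt (by omega) (by omega)
    have e0' : (a - (Wc - 1 - a) % (Wc + Wb)) % (Wc + Wb) = (2 * a - Wc + 1) % (Wc + Wb) := by
      rw [Int.sub_emod a ((Wc - 1 - a) % (Wc + Wb)), Int.emod_emod_of_dvd _ dvd_rfl,
        ← Int.sub_emod, show a - (Wc - 1 - a) = 2 * a - Wc + 1 by ring]
    have e1 : ((Wc - a) % (Wc + Wb) + a) % (Wc + Wb) = Wc := by
      rw [Int.emod_add_emod, show Wc - a + a = Wc by ring]
      exact Int.emod_eq_of_lt (by omega) (by omega)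
    have e1' : (a - (Wc - a) % (Wc + Wb)) % (Wc + Wb) = (2 * a - Wc) % (Wc + Wb) := by
      rw [Int.sub_emod a ((Wc - a) % (Wc + Wb)), Int.emod_emod_of_dvd _ dvd_rfl,
        ← Int.sub_emod, show a - (Wc - a) = 2 * a - Wc by ring]
    rw [e0, e0'] at h0
    rw [e1, e1'] at h1'
    have ht1lt : (2 * a - Wc + 1) % (Wc + Wb) < Wc := by
      by_contra hc
      exact absurd (h0.mpr (by omega)) (by omega)
    have hs : Wc ≤ (2 * a - Wc) % (Wc + Wb) := h1'.mp le_rfl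
    have ht1nn : 0 ≤ (2 * a - Wc + 1) % (Wc + Wb) := Int.emod_nonneg _ (by omega)
    have ht1w : (2 * a - Wc + 1) % (Wc + Wb) < Wc + Wb := Int.emod_lt_of_pos _ hW
    have hrel : ((2 * a - Wc + 1) % (Wc + Wb) - 1) % (Wc + Wb) = (2 * a - Wc) % (Wc + Wb) := by
      rw [Int.sub_emod ((2 * a - Wc + 1) % (Wc + Wb)) 1, Int.emod_emod_of_dvd _ dvd_rfl,
        ← Int.sub_emod, show 2 * a - Wc + 1 - 1 = 2 * a - Wc by ring]
    by_cases hz : (2 * a - Wc + 1) % (Wc + Wb) = 0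
    · have tb : 0 ≤ (2 * a) % (Wc + Wb) := Int.emod_nonneg _ (by omega)
      have tb2 : (2 * a) % (Wc + Wb) < Wc + Wb := Int.emod_lt_of_pos _ hW
      have hz2 : ((2 * a) % (Wc + Wb) - (Wc - 1)) % (Wc + Wb) = 0 := by
        rw [Int.sub_emod, Int.emod_emod_of_dvd _ dvd_rfl, ← Int.sub_emod]
        rw [show 2 * a - (Wc - 1) = 2 * a - Wc + 1 by ring]
        exact hz
      have hd2 : (Wc + Wb) ∣ ((2 * a) % (Wc + Wb) - (Wc - 1)) := by
        rwa [PySem.Int.emod_eq_zero_iff_dvd] at hz2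
      have := Int.eq_zero_of_abs_lt_dvd hd2 (by rw [abs_lt]; omega)
      omega
    · exfalso
      have : (2 * a - Wc) % (Wc + Wb) = (2 * a - Wc + 1) % (Wc + Wb) - 1 := by
        rw [← hrel]; exact Int.emod_eq_of_lt (by omega) (by omega)
      omega
  · intro hcong x _
    rw [hsimp]
    have hu0 : 0 ≤ (x + a) % (Wc + Wb) := Int.emod_nonneg _ (by omega)
    have hu1 : (x + a) % (Wc + Wb) < Wc + Wb := Int.emod_lt_of_pos _ hW
    have hv0 : 0 ≤ (a - x) % (Wc + Wb) := Int.emod_nonneg _ (by omega)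
    have hv1 : (a - x) % (Wc + Wb) < Wc + Wb := Int.emod_lt_of_pos _ hW
    have hsum : ((x + a) % (Wc + Wb) + (a - x) % (Wc + Wb)) % (Wc + Wb) = Wc - 1 := by
      rw [← Int.add_emod, show x + a + (a - x) = 2 * a by ring]; exact hcong
    have hd : (Wc + Wb) ∣ ((x + a) % (Wc + Wb) + (a - x) % (Wc + Wb) - (Wc - 1)) := by
      rw [← PySem.Int.emod_eq_zero_iff_dvd, Int.sub_emod, hsum,
        Int.emod_eq_of_lt (show (0:Int) ≤ Wc - 1 by omega) (show Wc - 1 < Wc + Wb by omega)]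
      simp
    by_cases hcase : (x + a) % (Wc + Wb) + (a - x) % (Wc + Wb) - (Wc - 1) < Wc + Wb
    · have := Int.eq_zero_of_abs_lt_dvd hd (by rw [abs_lt]; omega)
      omega
    · have hd' : (Wc + Wb) ∣ ((x + a) % (Wc + Wb) + (a - x) % (Wc + Wb) - (Wc - 1) - (Wc + Wb)) :=
        (Int.dvd_sub hd dvd_rfl)
      have := Int.eq_zero_of_abs_lt_dvd hd' (by rw [abs_lt]; omega)
      omega

theorem dvd_of_sol (Wc Wb a : Int) (h1 : 1 ≤ Wc) (h2 : 1 ≤ Wb)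
    (hs : (2 * a) % (Wc + Wb) = Wc - 1) : (Wc + Wb) ∣ (2 * a - (Wc - 1)) := by
  rw [← PySem.Int.emod_eq_zero_iff_dvd, Int.sub_emod, hs,
    Int.emod_eq_of_lt (show (0:Int) ≤ Wc - 1 by omega) (show Wc - 1 < Wc + Wb by omega)]
  simp

theorem solA_some_spec (Wc Wb a0 : Int) (h1 : 1 ≤ Wc) (h2 : 1 ≤ Wb) (h : solA Wc Wb = some a0) :
    0 ≤ a0 ∧ a0 < Wc + Wb ∧ (2 * a0) % (Wc + Wb) = Wc - 1 := by
  have hW : (0:Int) < Wc + Wb := by omega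
  rw [solA] at h
  simp only [PySem.Int.mod_eq_emod_of_pos hW, PySem.Int.mod_eq_emod_of_pos (show (0:Int) < 2 by norm_num),
    PySem.Int.floordiv_eq_ediv_of_pos (show (0:Int) < 2 by norm_num)] at h
  split_ifs at h with ho he
  · -- W odd
    have ha0 : a0 = (Wc - 1) * ((Wc + Wb + 1) / 2) % (Wc + Wb) := by
      simpa using h.symm
    refine ⟨?_, ?_, ?_⟩
    · rw [ha0]; exact Int.emod_nonneg _ (by omega)
    · rw [ha0]; exact Int.emod_lt_of_pos _ hW
    · rw [ha0]
      rw [Int.mul_emod 2 _, Int.emod_emod_of_dvd _ dvd_rfl, ← Int.mul_emod]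
      have h2 : (2:Int) ∣ (Wc + Wb + 1) := by omega
      have hcancel : (Wc + Wb + 1) / 2 * 2 = Wc + Wb + 1 := Int.ediv_mul_cancel h2
      have : 2 * ((Wc - 1) * ((Wc + Wb + 1) / 2)) = (Wc - 1) + (Wc + Wb) * (Wc - 1) := by
        nlinarith [hcancel]
      rw [this, Int.add_mul_emod_self_left]
      exact Int.emod_eq_of_lt (by omega) (by omega)
  · -- W even, c even
    have h2c : (2:Int) ∣ (Wc - 1) := by omega
    have ha0 : a0 = (Wc - 1) / 2 := by simpa using h.symm
    have hcancel : (Wc - 1) / 2 * 2 = Wc - 1 := Int.ediv_mul_cancel h2c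
    refine ⟨?_, ?_, ?_⟩
    · rw [ha0]; omega
    · rw [ha0]; omega
    · rw [ha0, show 2 * ((Wc - 1) / 2) = (Wc - 1) / 2 * 2 by ring, hcancel]
      exact Int.emod_eq_of_lt (by omega) (by omega)

theorem half_dvd (m z : Int) (hm : 0 < m) (h : 2 * m ∣ 2 * z) : m ∣ z := by
  obtain ⟨k, hk⟩ := h
  exact ⟨k, by linarith [hk]⟩

theorem odd_dvd (W z : Int) (hodd : W % 2 = 1) (h : W ∣ 2 * z) : W ∣ z := by
  obtain ⟨k, hk⟩ := h
  have hWk : Even (W * k) := by rw [← hk]; exact ⟨z, by ring⟩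
  have hek : Even k := by
    rcases Int.even_mul.mp hWk with hE | hE
    · exfalso; have := Int.even_iff.mp hE; omega
    · exact hE
  obtain ⟨j, hj⟩ := hek
  refine ⟨j, ?_⟩
  have : 2 * z = 2 * (W * j) := by rw [hk, hj]; ring
  linarith

theorem solA_min (Wc Wb a0 a : Int) (h1 : 1 ≤ Wc) (h2 : 1 ≤ Wb) (h : solA Wc Wb = some a0)
    (ha : 0 ≤ a) (ha' : a < Wc + Wb) (hs : (2 * a) % (Wc + Wb) = Wc - 1) : a0 ≤ a := by
  have hW : (0:Int) < Wc + Wb := by omega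
  obtain ⟨hb0, hb1, hb2⟩ := solA_some_spec Wc Wb a0 h1 h2 h
  have hdvd : (Wc + Wb) ∣ (2 * a - 2 * a0) := by
    have d1 := dvd_of_sol Wc Wb a h1 h2 hs
    have d2 := dvd_of_sol Wc Wb a0 h1 h2 hb2
    have := dvd_sub d1 d2
    simpa using this
  rw [solA] at h
  simp only [PySem.Int.mod_eq_emod_of_pos hW, PySem.Int.mod_eq_emod_of_pos (show (0:Int) < 2 by norm_num),
    PySem.Int.floordiv_eq_ediv_of_pos (show (0:Int) < 2 by norm_num)] at h
  split_ifs at h with ho he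
  · -- W odd: solution unique
    have hd2 : (Wc + Wb) ∣ (a - a0) := odd_dvd _ _ ho (by
      have : 2 * (a - a0) = 2 * a - 2 * a0 := by ring
      rw [this]; exact hdvd)
    have := Int.eq_zero_of_abs_lt_dvd hd2 (by rw [abs_lt]; omega)
    omega
  · -- W even: solutions a0 and a0 + W/2
    by_contra hlt
    have h2W : (2:Int) ∣ (Wc + Wb) := by omega
    obtain ⟨m, hm⟩ := h2W
    have hm0 : 0 < m := by omega
    have hmd : m ∣ (a - a0) := half_dvd m (a - a0) hm0 (by
      rw [← hm, show 2 * (a - a0) = 2 * a - 2 * a0 by ring]; exact hdvd)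
    have ha0 : a0 = (Wc - 1) / 2 := by simpa using h.symm
    have ha0m : a0 < m := by
      have : (Wc - 1) / 2 * 2 ≤ Wc - 1 := Int.ediv_mul_le _ (by norm_num)
      omega
    have := Int.eq_zero_of_abs_lt_dvd hmd (by rw [abs_lt]; omega)
    omega

theorem solA_none (Wc Wb a : Int) (h1 : 1 ≤ Wc) (h2 : 1 ≤ Wb) (h : solA Wc Wb = none)
    (ha : 0 ≤ a) (ha' : a < Wc + Wb) : (2 * a) % (Wc + Wb) ≠ Wc - 1 := by
  have hW : (0:Int) < Wc + Wb := by omega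
  rw [solA] at h
  simp only [PySem.Int.mod_eq_emod_of_pos hW, PySem.Int.mod_eq_emod_of_pos (show (0:Int) < 2 by norm_num),
    PySem.Int.floordiv_eq_ediv_of_pos (show (0:Int) < 2 by norm_num)] at h
  split_ifs at h with ho he
  intro hs
  have hd := dvd_of_sol Wc Wb a h1 h2 hs
  have h2W : (2:Int) ∣ (Wc + Wb) := by omega
  have : (2:Int) ∣ (2 * a - (Wc - 1)) := dvd_trans h2W hd
  omega

-- aStep, written through condA
theorem aStep_eq (N Wc Wb : Int) (d : PySem.Dict (Int × Int) Int) (a : Int) :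
    aStep N Wc Wb d a =
      if condA N Wc Wb a then
        if d.contains (Wc, Wb) = false then d.insert (Wc, Wb) a
        else d.insert (Wc, Wb) (min ((d.get? (Wc, Wb)).getD 0) a)
      else d := rfl

-- inserting the value already present changes nothing
theorem insert_get?_self (d : PySem.Dict (Int × Int) Int) (k : Int × Int) (v : Int)
    (hnd : d.keys.Nodup) (h : d.get? k = some v) : d.insert k v = d := by
  apply PySem.Dict.ext
  rw [PySem.Dict.items_insert_of_contains d v (by rw [PySem.Dict.contains_eq_isSome_get?, h]; rfl)]
  have : List.map (fun p : (Int × Int) × Int => if (p.1 == k) = true then (k, v) else p) d.items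
      = List.map id d.items := by
    apply List.map_congr_left
    intro p hp
    by_cases hk : p.1 = k
    · have hg : d.get? p.1 = some p.2 := PySem.Dict.get?_of_mem_items d (by simpa using hp) hnd
      rw [hk, h] at hg
      have hp2 : p.2 = v := by simpa using hg.symm
      simp [← hk, ← hp2]
    · simp [hk]
  simpa using this

-- the a-loop, when no a in the list satisfies the condition, is the identity
theorem aloop_skip (N Wc Wb : Int) (l : List Int) (d : PySem.Dict (Int × Int) Int)
    (h : ∀ a ∈ l, condA N Wc Wb a = false) : l.foldl (aStep N Wc Wb) d = d := by
  induction l with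
  | nil => rfl
  | cons a l ih =>
    rw [List.foldl_cons, aStep_eq, h a (by simp)]
    exact ih (fun a ha => h a (by simp [ha]))

-- the a-loop keeps the stored value once it is ≤ every remaining solution
theorem aloop_keep (N Wc Wb : Int) (l : List Int) (d : PySem.Dict (Int × Int) Int) (v : Int)
    (hnd : d.keys.Nodup) (hv : d.get? (Wc, Wb) = some v)
    (h : ∀ a ∈ l, condA N Wc Wb a = true → v ≤ a) : l.foldl (aStep N Wc Wb) d = d := by
  induction l with
  | nil => rfl
  | cons a l ih =>
    have hstep : aStep N Wc Wb d a = d := by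
      rw [aStep_eq]
      by_cases hc : condA N Wc Wb a = true
      · rw [hc, if_pos rfl, if_neg (by rw [PySem.Dict.contains_eq_isSome_get?, hv]; simp)]
        rw [hv]
        have : min ((some v).getD 0) a = v := by
          simp only [Option.getD_some]
          exact min_eq_left (h a (by simp) hc)
        rw [this]
        exact insert_get?_self d (Wc, Wb) v hnd hv
      · rw [Bool.not_eq_true] at hc
        rw [hc]; simp
    rw [List.foldl_cons, hstep]
    exact ih (fun a ha hca => h a (by simp [ha]) hca)

-- the full a-loop: inserts the closed-form minimal solution (or nothing)
theorem aloop_spec (N Wc Wb : Int) (d : PySem.Dict (Int × Int) Int)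
    (h1 : 1 ≤ Wc) (h2 : 1 ≤ Wb) (hlt : Wc + Wb < N)
    (hnd : d.keys.Nodup) (hfresh : d.contains (Wc, Wb) = false) :
    (PySem.List.pyRange 0 (Wc + Wb) 1).foldl (aStep N Wc Wb) d =
      match solA Wc Wb with
      | some a => d.insert (Wc, Wb) a
      | none => d := by
  cases hsol : solA Wc Wb with
  | none =>
    apply aloop_skip
    intro a ha
    rw [PySem.List.mem_pyRange_one] at ha
    rw [← Bool.not_eq_true, condA_iff N Wc Wb a h1 h2 hlt]
    exact solA_none Wc Wb a h1 h2 hsol ha.1 ha.2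
  | some a0 =>
    obtain ⟨ha00, ha01, ha02⟩ := solA_some_spec Wc Wb a0 h1 h2 hsol
    rw [PySem.List.pyRange_one_append 0 a0 (Wc + Wb) ha00 (by omega), List.foldl_append]
    rw [aloop_skip N Wc Wb _ d (by
      intro a ha
      rw [PySem.List.mem_pyRange_one] at ha
      rw [← Bool.not_eq_true, condA_iff N Wc Wb a h1 h2 hlt]
      intro hs
      exact absurd (solA_min Wc Wb a0 a h1 h2 hsol ha.1 (by omega) hs) (by omega))]
    rw [PySem.List.pyRange_one_cons ha01, List.foldl_cons]
    have hstep : aStep N Wc Wb d a0 = d.insert (Wc, Wb) a0 := by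
      rw [aStep_eq, if_pos (by rw [condA_iff N Wc Wb a0 h1 h2 hlt]; exact ha02), if_pos hfresh]
    rw [hstep]
    exact aloop_keep N Wc Wb _ _ a0
      (by
        rw [PySem.Dict.keys_insert_of_not_contains d a0 hfresh]
        refine List.Nodup.append hnd (by simp) ?_
        intro x hx
        simp only [List.mem_singleton]
        intro hxx
        rw [hxx] at hx
        exact absurd ((PySem.Dict.contains_iff_mem_keys d (Wc, Wb)).mpr hx) (by rw [hfresh]; simp))
      (PySem.Dict.get?_insert_self d (Wc, Wb) a0)
      (by
        intro a ha hca
        rw [PySem.List.mem_pyRange_one] at ha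
        rw [condA_iff N Wc Wb a h1 h2 hlt] at hca
        exact solA_min Wc Wb a0 a h1 h2 hsol (by omega) ha.2 hca)

-- the Wb-loop appends exactly the gEnt entries
theorem bloop_spec (N Wc : Int) (lb : List Int) (h1 : 1 ≤ Wc) :
    ∀ (d : PySem.Dict (Int × Int) Int), (∀ Wb ∈ lb, 1 ≤ Wb) → lb.Nodup →
    d.keys.Nodup → (∀ Wb ∈ lb, (Wc, Wb) ∉ d.keys) →
    (lb.foldl (fun values Wb =>
        if Wc + Wb < N ∧ PySem.Int.mod N (Wc + Wb) = 0 then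
          (PySem.List.pyRange 0 (Wc + Wb) 1).foldl (aStep N Wc Wb) values
        else values) d).items = d.items ++ lb.filterMap (gEnt N Wc) ∧
    (lb.foldl (fun values Wb =>
        if Wc + Wb < N ∧ PySem.Int.mod N (Wc + Wb) = 0 then
          (PySem.List.pyRange 0 (Wc + Wb) 1).foldl (aStep N Wc Wb) values
        else values) d).keys.Nodup := by
  induction lb with
  | nil => intro d _ _ hnd _; simp [hnd]
  | cons Wb lb ih =>
    intro d hb hnodup hnd hfresh
    by_cases hcond : Wc + Wb < N ∧ PySem.Int.mod N (Wc + Wb) = 0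
    · have hWb1 : 1 ≤ Wb := hb Wb (by simp)
      have hfr : d.contains (Wc, Wb) = false := by
        rw [← Bool.not_eq_true]
        intro hc
        exact hfresh Wb (by simp) ((PySem.Dict.contains_iff_mem_keys d (Wc, Wb)).mp hc)
      rw [List.foldl_cons, if_pos hcond,
        aloop_spec N Wc Wb d h1 hWb1 hcond.1 hnd hfr]
      cases hsol : solA Wc Wb with
      | none =>
        have hg : gEnt N Wc Wb = none := by rw [gEnt, if_pos hcond, hsol]; rfl
        have := ih d (fun b hb' => hb b (by simp [hb'])) hnodup.of_cons hnd
          (fun b hb' => hfresh b (by simp [hb']))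
        rw [List.filterMap_cons, hg]
        exact this
      | some a0 =>
        have hg : gEnt N Wc Wb = some ((Wc, Wb), a0) := by rw [gEnt, if_pos hcond, hsol]; rfl
        have hkeys : (d.insert (Wc, Wb) a0).keys = d.keys ++ [(Wc, Wb)] :=
          PySem.Dict.keys_insert_of_not_contains d a0 hfr
        have hnd' : (d.insert (Wc, Wb) a0).keys.Nodup := by
          rw [hkeys]
          refine List.Nodup.append hnd (by simp) ?_
          intro x hx
          simp only [List.mem_singleton]
          intro hxx
          rw [hxx] at hx
          exact hfresh Wb (by simp) hx
        have hfresh' : ∀ b ∈ lb, (Wc, b) ∉ (d.insert (Wc, Wb) a0).keys := by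
          intro b hb' hmem
          rw [hkeys, List.mem_append] at hmem
          rcases hmem with hmem | hmem
          · exact hfresh b (by simp [hb']) hmem
          · simp only [List.mem_singleton, Prod.mk.injEq] at hmem
            exact (List.nodup_cons.mp hnodup).1 (by rw [← hmem.2]; exact hb')
        obtain ⟨hitems', hnd''⟩ := ih (d.insert (Wc, Wb) a0)
          (fun b hb' => hb b (by simp [hb'])) hnodup.of_cons hnd' hfresh'
        constructor
        · rw [hitems', PySem.Dict.items_insert_of_not_contains d a0 hfr,
            List.filterMap_cons, hg, List.append_assoc]
          rfl
        · exact hnd''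
    · rw [List.foldl_cons, if_neg hcond]
      have hg : gEnt N Wc Wb = none := by rw [gEnt, if_neg hcond]
      have := ih d (fun b hb' => hb b (by simp [hb'])) hnodup.of_cons hnd
        (fun b hb' => hfresh b (by simp [hb']))
      rw [List.filterMap_cons, hg]
      exact this

-- every entry produced for outer index Wc carries Wc as first key component
theorem gEnt_fst (N Wc Wb : Int) (p : (Int × Int) × Int) (h : gEnt N Wc Wb = some p) :
    p.1.1 = Wc := by
  rw [gEnt] at h
  split_ifs at h
  cases hs : solA Wc Wb with
  | none => rw [hs] at h; simp at h
  | some a => rw [hs] at h; simp at h; rw [← h]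

-- the Wc-loop: the final dict's items, in order
theorem cloop_spec (N : Int) (lc : List Int) :
    ∀ (d : PySem.Dict (Int × Int) Int), (∀ Wc ∈ lc, 1 ≤ Wc) → lc.Nodup →
    d.keys.Nodup → (∀ Wc ∈ lc, ∀ Wb : Int, (Wc, Wb) ∉ d.keys) →
    (lc.foldl (fun values Wc =>
        (PySem.List.pyRange 1 N 1).foldl (fun values Wb =>
          if Wc + Wb < N ∧ PySem.Int.mod N (Wc + Wb) = 0 then
            (PySem.List.pyRange 0 (Wc + Wb) 1).foldl (aStep N Wc Wb) values
          else values) values) d).items =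
      d.items ++ lc.flatMap (fun Wc => (PySem.List.pyRange 1 N 1).filterMap (gEnt N Wc)) := by
  induction lc with
  | nil => intro d _ _ _ _; simp
  | cons Wc lc ih =>
    intro d hc hnodup hnd hfresh
    have hWc1 : 1 ≤ Wc := hc Wc (by simp)
    obtain ⟨hitems, hnd'⟩ := bloop_spec N Wc (PySem.List.pyRange 1 N 1) hWc1 d
      (fun b hb => (PySem.List.mem_pyRange_one.mp hb).1) (PySem.List.nodup_pyRange_one 1 N)
      hnd (fun b _ => hfresh Wc (by simp) b)
    rw [List.foldl_cons]
    have hkeys1 : ∀ q ∈ ((PySem.List.pyRange 1 N 1).foldl (fun values Wb =>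
        if Wc + Wb < N ∧ PySem.Int.mod N (Wc + Wb) = 0 then
          (PySem.List.pyRange 0 (Wc + Wb) 1).foldl (aStep N Wc Wb) values
        else values) d).keys, q ∈ d.keys ∨ q.1 = Wc := by
      intro q hq
      simp only [PySem.Dict.keys] at hq ⊢
      rw [hitems, List.map_append, List.mem_append] at hq
      rcases hq with hq | hq
      · exact Or.inl hq
      · right
        obtain ⟨p, hp, hpq⟩ := List.mem_map.mp hq
        obtain ⟨Wb, _, hg⟩ := List.mem_filterMap.mp hp
        rw [← hpq]
        exact gEnt_fst N Wc Wb p hg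
    have hfresh' : ∀ c ∈ lc, ∀ Wb : Int, (c, Wb) ∉ ((PySem.List.pyRange 1 N 1).foldl (fun values Wb =>
        if Wc + Wb < N ∧ PySem.Int.mod N (Wc + Wb) = 0 then
          (PySem.List.pyRange 0 (Wc + Wb) 1).foldl (aStep N Wc Wb) values
        else values) d).keys := by
      intro c hcm Wb hmem
      rcases hkeys1 _ hmem with hmem' | hmem'
      · exact hfresh c (by simp [hcm]) Wb hmem'
      · simp only at hmem'
        exact (List.nodup_cons.mp hnodup).1 (by rw [← hmem']; exact hcm)
    rw [ih _ (fun c hcm => hc c (by simp [hcm])) hnodup.of_cons hnd' hfresh', hitems,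
      List.flatMap_cons, List.append_assoc]

-- appending an optional element
def optApp {β : Type} (acc : List β) (o : Option β) : List β :=
  match o with | some y => acc ++ [y] | none => acc

-- a fold appending an optional singleton is a filterMap
theorem foldl_append_option {α β : Type} (h : α → Option β) (l : List α) (acc : List β) :
    l.foldl (fun acc x => optApp acc (h x)) acc = acc ++ l.filterMap h := by
  induction l generalizing acc with
  | nil => simp
  | cons x l ih =>
    rw [List.foldl_cons, List.filterMap_cons]
    cases hx : h x with
    | none => rw [ih]; rfl
    | some y => rw [ih]; simp [optApp]

-- B's inner loop over a divisor W, as an Option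
def hDiv (N Wc W : Int) : Option ((Int × Int) × Int) :=
  if Wc < W then gEnt N Wc (W - Wc) else none

-- a range shifted by a constant
theorem pyRange_shift (c a b : Int) :
    (PySem.List.pyRange a b 1).map (fun x => c + x) = PySem.List.pyRange (c + a) (c + b) 1 := by
  rw [PySem.List.pyRange_one a b, PySem.List.pyRange_one (c + a) (c + b), List.map_map,
    show c + b - (c + a) = b - a by ring]
  apply List.map_congr_left
  intro k _
  simp only [Function.comp]
  ring

-- re-indexing: iterating over the divisors W of N equals iterating over all Wb
theorem divisor_reindex (N Wc : Int) (h1 : 1 ≤ Wc) :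
    ((PySem.List.pyRange 2 N 1).filter (fun W => decide (PySem.Int.mod N W = 0))).filterMap (hDiv N Wc)
      = (PySem.List.pyRange 1 N 1).filterMap (gEnt N Wc) := by
  rw [List.filterMap_filter]
  have hfe : (fun W => if (decide (PySem.Int.mod N W = 0)) = true then hDiv N Wc W else none)
      = hDiv N Wc := by
    funext W
    by_cases hm : PySem.Int.mod N W = 0
    · simp [hm]
    · rw [if_neg (by simpa using hm)]
      symm
      rw [hDiv, gEnt, show Wc + (W - Wc) = W by ring]
      split_ifs with h h2
      · exact absurd h2.2 hm
      · rfl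
      · rfl
  rw [hfe]
  have hcongr : (PySem.List.pyRange 1 N 1).filterMap (gEnt N Wc)
      = (PySem.List.pyRange 1 N 1).filterMap (fun Wb => hDiv N Wc (Wc + Wb)) := by
    apply List.filterMap_congr
    intro Wb hWb
    rw [PySem.List.mem_pyRange_one] at hWb
    rw [hDiv, if_pos (by omega), show Wc + Wb - Wc = Wb by ring]
  rw [hcongr]
  have hcomp : (fun Wb => hDiv N Wc (Wc + Wb)) = (hDiv N Wc ∘ fun Wb => Wc + Wb) := rfl
  rw [hcomp, ← List.filterMap_map, pyRange_shift Wc 1 N]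
  by_cases hN : N ≤ 1
  · have e1 : PySem.List.pyRange (Wc + 1) (Wc + N) 1 = [] := by
      rw [PySem.List.pyRange_one, show (Wc + N - (Wc + 1)).toNat = 0 by omega]
      rfl
    have e2 : PySem.List.pyRange 2 N 1 = [] := by
      rw [PySem.List.pyRange_one, show (N - 2).toNat = 0 by omega]
      rfl
    rw [e1, e2]
  · have hnone_low : ∀ W ∈ PySem.List.pyRange 2 (Wc + 1) 1, hDiv N Wc W = none := by
      intro W hW
      rw [PySem.List.mem_pyRange_one] at hW
      rw [hDiv, if_neg (by omega)]
    have hnone_high : ∀ W ∈ PySem.List.pyRange N (Wc + N) 1, hDiv N Wc W = none := by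
      intro W hW
      rw [PySem.List.mem_pyRange_one] at hW
      rw [hDiv]
      split_ifs with h
      · rw [gEnt, show Wc + (W - Wc) = W by ring, if_neg (by omega)]
      · rfl
    have e1 : (PySem.List.pyRange 2 (Wc + N) 1).filterMap (hDiv N Wc)
        = (PySem.List.pyRange (Wc + 1) (Wc + N) 1).filterMap (hDiv N Wc) := by
      rw [PySem.List.pyRange_one_append 2 (Wc + 1) (Wc + N) (by omega) (by omega),
        List.filterMap_append, List.filterMap_eq_nil_iff.mpr hnone_low, List.nil_append]
    have e2 : (PySem.List.pyRange 2 (Wc + N) 1).filterMap (hDiv N Wc)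
        = (PySem.List.pyRange 2 N 1).filterMap (hDiv N Wc) := by
      rw [PySem.List.pyRange_one_append 2 N (Wc + N) (by omega) (by omega),
        List.filterMap_append, List.filterMap_eq_nil_iff.mpr hnone_high, List.append_nil]
    rw [← e1, e2]

-- ===== VERDICT (by name: the statement is the Claim_ definition above) =====
theorem scan_possible_values_spec : Claim_equal_scan_possible_values := by
  intro N _
  show scan_possible_values N = scan_possible_values_alt N
  simp only [scan_possible_values, scan_possible_values_alt]
  have hitems := cloop_spec N (PySem.List.pyRange 1 N 1) PySem.Dict.empty
    (fun c hc => (PySem.List.mem_pyRange_one.mp hc).1) (PySem.List.nodup_pyRange_one 1 N)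
    PySem.Dict.nodup_keys_empty (by intro c _ b hmem; simp [PySem.Dict.keys, PySem.Dict.empty] at hmem)
  have hB : ∀ (acc : List (List Int)) (Wc : Int), 1 ≤ Wc →
      ((PySem.List.pyRange 2 N 1).filter (fun W => decide (PySem.Int.mod N W = 0))).foldl
        (fun (out : List (List Int)) (W : Int) =>
          if Wc < W then
            if PySem.Int.mod W 2 = 1 then
              out ++ [[Wc, W - Wc, PySem.Int.mod ((Wc - 1) * PySem.Int.floordiv (W + 1) 2) W]]
            else if PySem.Int.mod (Wc - 1) 2 = 0 then
              out ++ [[Wc, W - Wc, PySem.Int.floordiv (Wc - 1) 2]]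
            else out
          else out) acc
      = acc ++ ((PySem.List.pyRange 1 N 1).filterMap (gEnt N Wc)).map
          (fun p => [p.1.1, p.1.2, p.2]) := by
    intro acc Wc hWc
    have hstep : (fun (out : List (List Int)) (W : Int) =>
          if Wc < W then
            if PySem.Int.mod W 2 = 1 then
              out ++ [[Wc, W - Wc, PySem.Int.mod ((Wc - 1) * PySem.Int.floordiv (W + 1) 2) W]]
            else if PySem.Int.mod (Wc - 1) 2 = 0 then
              out ++ [[Wc, W - Wc, PySem.Int.floordiv (Wc - 1) 2]]
            else out
          else out) =
        (fun (out : List (List Int)) (W : Int) =>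
          optApp out (if Wc < W then
            if PySem.Int.mod W 2 = 1 then
              some [Wc, W - Wc, PySem.Int.mod ((Wc - 1) * PySem.Int.floordiv (W + 1) 2) W]
            else if PySem.Int.mod (Wc - 1) 2 = 0 then
              some [Wc, W - Wc, PySem.Int.floordiv (Wc - 1) 2]
            else none
          else none)) := by
      funext out W
      split_ifs <;> rfl
    rw [hstep, foldl_append_option (fun W : Int =>
        if Wc < W then
          if PySem.Int.mod W 2 = 1 then
            some [Wc, W - Wc, PySem.Int.mod ((Wc - 1) * PySem.Int.floordiv (W + 1) 2) W]
          else if PySem.Int.mod (Wc - 1) 2 = 0 then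
            some [Wc, W - Wc, PySem.Int.floordiv (Wc - 1) 2]
          else none
        else none)]
    have hpt : ∀ W ∈ (PySem.List.pyRange 2 N 1).filter (fun W => decide (PySem.Int.mod N W = 0)),
        (if Wc < W then
          if PySem.Int.mod W 2 = 1 then
            some [Wc, W - Wc, PySem.Int.mod ((Wc - 1) * PySem.Int.floordiv (W + 1) 2) W]
          else if PySem.Int.mod (Wc - 1) 2 = 0 then
            some [Wc, W - Wc, PySem.Int.floordiv (Wc - 1) 2]
          else none
        else none)
        = (hDiv N Wc W).map (fun p : (Int × Int) × Int => [p.1.1, p.1.2, p.2]) := by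
      intro W hWm
      obtain ⟨hWr, hWd⟩ := List.mem_filter.mp hWm
      rw [PySem.List.mem_pyRange_one] at hWr
      have hmod : PySem.Int.mod N W = 0 := by simpa using hWd
      by_cases hlt : Wc < W
      · rw [if_pos hlt, hDiv, if_pos hlt, gEnt, show Wc + (W - Wc) = W by ring]
        rw [if_pos (⟨hWr.2, hmod⟩ : W < N ∧ PySem.Int.mod N W = 0)]
        rw [solA, show Wc + (W - Wc) = W by ring]
        split_ifs <;> rfl
      · rw [if_neg hlt, hDiv, if_neg hlt]
        rfl
    rw [List.filterMap_congr hpt, ← List.map_filterMap, divisor_reindex N Wc hWc]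
  have houter : (PySem.List.pyRange 1 N 1).foldl
      (fun (out : List (List Int)) (Wc : Int) =>
        ((PySem.List.pyRange 2 N 1).filter (fun W => decide (PySem.Int.mod N W = 0))).foldl
          (fun (out : List (List Int)) (W : Int) =>
            if Wc < W then
              if PySem.Int.mod W 2 = 1 then
                out ++ [[Wc, W - Wc, PySem.Int.mod ((Wc - 1) * PySem.Int.floordiv (W + 1) 2) W]]
              else if PySem.Int.mod (Wc - 1) 2 = 0 then
                out ++ [[Wc, W - Wc, PySem.Int.floordiv (Wc - 1) 2]]
              else out
            else out) out) []
      = (PySem.List.pyRange 1 N 1).foldl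
        (fun (out : List (List Int)) (Wc : Int) =>
          out ++ ((PySem.List.pyRange 1 N 1).filterMap (gEnt N Wc)).map
            (fun p => [p.1.1, p.1.2, p.2])) [] := by
    apply PySem.List.foldl_congr_mem
    intro acc Wc hWcm
    exact hB acc Wc (PySem.List.mem_pyRange_one.mp hWcm).1
  rw [houter, PySem.List.foldl_append_eq_flatMap, List.nil_append]
  congr 1
  rw [hitems]
  have hempty : (PySem.Dict.empty : PySem.Dict (Int × Int) Int).items = [] := rfl
  rw [hempty, List.nil_append, List.map_flatMap]
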